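-- pv_equiv track=rewrite | github.com/ai-agentopia/agentopia-super-rag | src/services/knowledge.py | _split_oversized_block
-- ===== SOURCE A (Python) =====
-- def _split_oversized_block(block: str, max_size: int) -> list[str]:
--     """Split an oversized block on internal boundaries (newline, list items).
--
--     Used by _chunk_markdown_aware when a single structural block exceeds max_size.
--     """
--     lines = block.split("\n")
--     chunks: list[str] = []
--     current = ""
--
--     for line in lines:
--         if not current:
--             current = line
--         elif len(current) + 1 + len(line) <= max_size:
--             current = f"{current}\n{line}"
--         else:
--             chunks.append(current)
--             current = line
--
--     if current:
--         chunks.append(current)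
--
--     # Final safety: if any chunk still exceeds max_size, hard-split
--     result: list[str] = []
--     for chunk in chunks:
--         if len(chunk) <= max_size:
--             result.append(chunk)
--         else:
--             start = 0
--             while start < len(chunk):
--                 result.append(chunk[start : start + max_size])
--                 start += max_size
--
--     return result
-- ===== SOURCE B (Python) =====
-- def _split_oversized_block(block: str, max_size: int) -> list[str]:
--     """Group-jumping re-implementation: instead of streaming a growing `current`
--     string through a per-line accumulator loop plus a second hard-split pass,
--     locate each packed group of lines arithmetically (skip empty leading lines,
--     extend while the running joined size fits), join the group once, hard-split
--     it by slicing a range on the spot, and jump the index to the group's end."""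
--     result: list[str] = []
--     lines = block.split("\n")
--     i, n = 0, len(lines)
--     while i < n:
--         line = lines[i]
--         if not line:
--             i += 1
--             continue
--         size = len(line)
--         j = i + 1
--         while j < n and size + 1 + len(lines[j]) <= max_size:
--             size += 1 + len(lines[j])
--             j += 1
--         chunk = "\n".join(lines[i:j])
--         if len(chunk) <= max_size:
--             result.append(chunk)
--         else:
--             result.extend(chunk[k : k + max_size] for k in range(0, len(chunk), max_size))
--         i = j
--     return result
-- ===== Notes on version B (the rewrite author's own statement) =====
-- stated objective: alternative
-- what changed: B replaces A's per-line accumulator loop (growing a `current` string) plus second hard-split pass by a group-jumping scan: it finds each packed group's end arithmetically from the line lengths, joins the group once, hard-splits it in place by slicing a range, and jumps the index past the group.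
import Mathlib
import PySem

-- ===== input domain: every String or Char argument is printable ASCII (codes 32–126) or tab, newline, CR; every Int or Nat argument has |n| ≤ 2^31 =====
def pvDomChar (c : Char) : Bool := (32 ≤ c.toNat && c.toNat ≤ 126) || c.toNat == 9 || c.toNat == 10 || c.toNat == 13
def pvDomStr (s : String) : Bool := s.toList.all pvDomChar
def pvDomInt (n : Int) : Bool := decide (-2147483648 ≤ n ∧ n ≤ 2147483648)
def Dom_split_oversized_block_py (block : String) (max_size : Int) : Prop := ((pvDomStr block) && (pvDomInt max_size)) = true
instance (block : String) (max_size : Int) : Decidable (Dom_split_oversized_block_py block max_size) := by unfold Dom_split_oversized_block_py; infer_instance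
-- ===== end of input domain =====

-- B replaces A's per-line accumulator loop plus second hard-split pass by a group-jumping
-- scan: each packed group of lines is located arithmetically, joined once, and hard-split
-- on the spot (objective: alternative decomposition; return value only, no mutation).

-- ===== PORT A =====
-- A's hard-split while loop 'start = 0; while start < len(chunk): append
-- chunk[start:start+max_size]; start += max_size', transcribed with fuel
-- chunk.toList.length (enough iterations whenever 1 ≤ max_size; for max_size ≤ 0 on a
-- nonempty chunk the Python loop never advances and does not return — excluded by Pre_).
-- Exact: chunk[a:b] is PySem.Str.slice.
def pvHardSplit (chunk : String) (max_size : Int) : Nat → Int → List String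
  | 0, _ => []
  | fuel + 1, start =>
      if start < PySem.Str.len chunk then
        PySem.Str.slice chunk (some start) (some (start + max_size)) ::
          pvHardSplit chunk max_size fuel (start + max_size)
      else []

-- body of A's second loop
def pvEmit (max_size : Int) (result : List String) (chunk : String) : List String :=
  if PySem.Str.len chunk ≤ max_size then result ++ [chunk]
  else result ++ pvHardSplit chunk max_size chunk.toList.length 0

def split_oversized_block_py (block : String) (max_size : Int) : List String :=
  let lines := (PySem.Str.split? block "\n").getD []   -- sep "\n" ≠ "": always some
  let st := lines.foldl (fun (st : List String × String) line =>
      if st.2 = "" then (st.1, line)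
      else if PySem.Str.len st.2 + 1 + PySem.Str.len line ≤ max_size then
        (st.1, st.2 ++ "\n" ++ line)
      else (st.1 ++ [st.2], line)) ([], "")
  let chunks := if st.2 ≠ "" then st.1 ++ [st.2] else st.1
  chunks.foldl (pvEmit max_size) []

-- ===== PORT B =====
-- Source B's hard split: '[chunk[k:k+max_size] for k in range(0, len(chunk), max_size)]'
def pvHardB (max_size : Int) (chunk : String) : List String :=
  if PySem.Str.len chunk ≤ max_size then [chunk]
  else (PySem.List.pyRange 0 (PySem.Str.len chunk) max_size).map
        (fun k => PySem.Str.slice chunk (some k) (some (k + max_size)))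

-- Source B's inner while loop: how many following lines extend the group (j - i - 1)
def pvExtendB (max_size : Int) (size : Int) : List String → Nat
  | [] => 0
  | l :: rest =>
      if size + 1 + PySem.Str.len l ≤ max_size then
        pvExtendB max_size (size + 1 + PySem.Str.len l) rest + 1
      else 0

-- Source B's outer while loop over the index i, transcribed as recursion on the suffix
-- lines[i:] (i += 1 on an empty line; otherwise jump i = j past the group)
def pvGoB (max_size : Int) : List String → List String
  | [] => []
  | l :: rest =>
      if l = "" then pvGoB max_size rest
      else
        let k := pvExtendB max_size (PySem.Str.len l) rest
        pvHardB max_size (PySem.Str.join "\n" (l :: rest.take k)) ++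
          pvGoB max_size (rest.drop k)
termination_by lines => lines.length
decreasing_by
  all_goals (simp only [List.length_cons, List.length_drop]; omega)

def split_oversized_block_py_alt (block : String) (max_size : Int) : List String :=
  pvGoB max_size ((PySem.Str.split? block "\n").getD [])

-- ===== PRECONDITION & SPEC =====
-- Pre_ excludes exactly the inputs where A does not return: when max_size ≤ 0 and some
-- line of the block is nonempty, A's hard-split while loop never advances (start +=
-- max_size) and Python loops forever.
def Pre_split_oversized_block_py (block : String) (max_size : Int) : Prop :=
  1 ≤ max_size ∨ ∀ l ∈ (PySem.Str.split? block "\n").getD [], l = ""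
instance (block : String) (max_size : Int) : Decidable (Pre_split_oversized_block_py block max_size) := by unfold Pre_split_oversized_block_py; infer_instance

def pvWitness_split_oversized_block_py : String × Int := ("ab cd\nef\nghijkl", 6)

def Spec_split_oversized_block_py (block : String) (max_size : Int) (out : List String) : Prop := out = split_oversized_block_py_alt block max_size
instance (block : String) (max_size : Int) (out : List String) : Decidable (Spec_split_oversized_block_py block max_size out) := by unfold Spec_split_oversized_block_py; infer_instance

-- ===== CLAIM (what is proved, stated in full; the proofs are below) =====
def Claim_equal_split_oversized_block_py : Prop := ∀ (block : String) (max_size : Int), Dom_split_oversized_block_py block max_size → Pre_split_oversized_block_py block max_size → Spec_split_oversized_block_py block max_size (split_oversized_block_py block max_size)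

-- ===== LEMMAS AND PROOFS =====

-- proof-only name for A's packing-loop body
def pvStepA (m : Int) (st : List String × String) (line : String) : List String × String :=
  if st.2 = "" then (st.1, line)
  else if PySem.Str.len st.2 + 1 + PySem.Str.len line ≤ m then (st.1, st.2 ++ "\n" ++ line)
  else (st.1 ++ [st.2], line)

-- A's hard split as a function of one chunk
def pvHardA (m : Int) (chunk : String) : List String :=
  if PySem.Str.len chunk ≤ m then [chunk]
  else pvHardSplit chunk m chunk.toList.length 0

-- the packed chunk list A builds, tracked as a recursion on the lines
def pvGroups (m : Int) (cur : String) : List String → List String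
  | [] => if cur = "" then [] else [cur]
  | l :: ls =>
      if cur = "" then pvGroups m l ls
      else if PySem.Str.len cur + 1 + PySem.Str.len l ≤ m then
        pvGroups m (cur ++ "\n" ++ l) ls
      else cur :: pvGroups m l ls

theorem pvEmit_eq (m : Int) (acc : List String) (c : String) :
    pvEmit m acc c = acc ++ pvHardA m c := by
  unfold pvEmit pvHardA; split_ifs <;> simp

theorem pvFoldl_emit (m : Int) (cs : List String) :
    ∀ acc, cs.foldl (pvEmit m) acc = acc ++ cs.flatMap (pvHardA m) := by
  induction cs with
  | nil => simp
  | cons c cs ih => intro acc; simp [pvEmit_eq, ih]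

-- A's fold + finalization produces exactly pvGroups
theorem pvFoldA_groups (m : Int) (lines : List String) :
    ∀ (chunks : List String) (cur : String),
      (if (lines.foldl (pvStepA m) (chunks, cur)).2 ≠ "" then
        (lines.foldl (pvStepA m) (chunks, cur)).1 ++ [(lines.foldl (pvStepA m) (chunks, cur)).2]
       else (lines.foldl (pvStepA m) (chunks, cur)).1)
      = chunks ++ pvGroups m cur lines := by
  induction lines with
  | nil =>
      intro chunks cur
      by_cases h : cur = "" <;> simp [pvGroups, h]
  | cons l ls ih =>
      intro chunks cur
      simp only [List.foldl_cons]
      by_cases h0 : cur = ""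
      · have : pvStepA m (chunks, cur) l = (chunks, l) := by simp [pvStepA, h0]
        rw [this, ih chunks l]; simp [pvGroups, h0]
      · by_cases h1 : PySem.Str.len cur + 1 + PySem.Str.len l ≤ m
        · have : pvStepA m (chunks, cur) l = (chunks, cur ++ "\n" ++ l) := by
            simp only [pvStepA]; rw [if_neg h0, if_pos h1]
          rw [this, ih chunks (cur ++ "\n" ++ l)]
          simp only [pvGroups]; rw [if_neg h0, if_pos h1]
        · have : pvStepA m (chunks, cur) l = (chunks ++ [cur], l) := by
            simp only [pvStepA]; rw [if_neg h0, if_neg h1]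
          rw [this, ih (chunks ++ [cur]) l]
          simp only [pvGroups]; rw [if_neg h0, if_neg h1]; simp

-- string facts, proved through toList
theorem pvLen_append3 (a b : String) :
    PySem.Str.len (a ++ "\n" ++ b) = PySem.Str.len a + 1 + PySem.Str.len b := by
  simp [PySem.Str.len]; omega

theorem pvAppend3_ne_empty (a b : String) (ha : a ≠ "") : a ++ "\n" ++ b ≠ "" := by
  intro h
  have := congrArg String.toList h
  simp at this

theorem pvJoin_singleton (a : String) : PySem.Str.join "\n" [a] = a := by
  simp [PySem.Str.join]

theorem pvCharsJoin_merge (p q : List Char) (t : List (List Char)) :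
    PySem.Chars.join ['\n'] ((p ++ '\n' :: q) :: t)
      = p ++ '\n' :: PySem.Chars.join ['\n'] (q :: t) := by
  cases t with
  | nil => simp [PySem.Chars.join, List.intercalate]
  | cons r rs =>
      rw [PySem.Chars.join_cons_cons, PySem.Chars.join_cons_cons]
      simp

theorem pvJoin_cons_cons (a b : String) (t : List String) :
    PySem.Str.join "\n" (a :: b :: t) = PySem.Str.join "\n" ((a ++ "\n" ++ b) :: t) := by
  simp [PySem.Str.join, pvCharsJoin_merge]
  rw [PySem.Chars.join_cons_cons]
  apply String.ext
  simp

-- induction forms of pyRange for a positive step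
theorem pvRange_pos_nil (a b s : Int) (hs : 0 < s) (h : ¬ a < b) :
    PySem.List.pyRange a b s = [] := by
  rw [PySem.List.pyRange_of_pos a b hs, if_neg h]
  simp

theorem pvRange_pos_cons (a b s : Int) (hs : 0 < s) (h : a < b) :
    PySem.List.pyRange a b s = a :: PySem.List.pyRange (a + s) b s := by
  rw [PySem.List.pyRange_of_pos a b hs, PySem.List.pyRange_of_pos (a + s) b hs, if_pos h]
  have hq0 : 0 ≤ (b - a - 1) / s := Int.ediv_nonneg (by omega) (by omega)
  have hcount : b - a + s - 1 = (b - a - 1) + 1 * s := by ring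
  rw [hcount, Int.add_mul_ediv_right _ _ (by omega : s ≠ 0)]
  have htn : ((b - a - 1) / s + 1 * 1).toNat = ((b - a - 1) / s).toNat + 1 := by omega
  simp only [one_mul] at htn ⊢
  rw [htn, List.range_succ_eq_map]
  have htail : (if a + s < b then ((b - (a + s) + s - 1) / s).toNat else 0)
      = ((b - a - 1) / s).toNat := by
    by_cases h2 : a + s < b
    · rw [if_pos h2]; congr 1; congr 1; ring
    · rw [if_neg h2]
      have : (b - a - 1) / s = 0 := Int.ediv_eq_zero_of_lt (by omega) (by omega)
      omega
  rw [htail]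
  simp only [List.map_cons, List.map_map, List.cons.injEq]
  refine ⟨by simp, ?_⟩
  apply List.map_congr_left
  intro k _
  simp [Function.comp]
  ring

-- A's hard-split while loop computes B's range comprehension (given 1 ≤ m)
theorem pvHardSplit_eq_range (c : String) (m : Int) (hm : 1 ≤ m) :
    ∀ (fuel : Nat) (start : Int), PySem.Str.len c ≤ start + fuel →
      pvHardSplit c m fuel start
        = (PySem.List.pyRange start (PySem.Str.len c) m).map
            (fun k => PySem.Str.slice c (some k) (some (k + m))) := by
  intro fuel
  induction fuel with
  | zero =>
      intro start h
      rw [pvRange_pos_nil start (PySem.Str.len c) m (by omega) (by omega)]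
      rfl
  | succ fuel ih =>
      intro start h
      by_cases hlt : start < PySem.Str.len c
      · rw [pvRange_pos_cons start (PySem.Str.len c) m (by omega) hlt]
        simp only [pvHardSplit, if_pos hlt, List.map_cons]
        rw [ih (start + m) (by push_cast at h ⊢; omega)]
      · rw [pvRange_pos_nil start (PySem.Str.len c) m (by omega) hlt]
        simp only [pvHardSplit]
        rw [if_neg hlt]
        simp

theorem pvHardA_eq_hardB (m : Int) (hm : 1 ≤ m) (c : String) :
    pvHardA m c = pvHardB m c := by
  unfold pvHardA pvHardB
  split_ifs with h
  · rfl
  · rw [pvHardSplit_eq_range c m hm c.toList.length 0 (by simp [PySem.Str.len])]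

-- the group decomposition: a nonempty current packs exactly the next pvExtendB lines
theorem pvGroups_extend (m : Int) (ls : List String) :
    ∀ cur, cur ≠ "" →
      pvGroups m cur ls
        = PySem.Str.join "\n" (cur :: ls.take (pvExtendB m (PySem.Str.len cur) ls))
            :: pvGroups m "" (ls.drop (pvExtendB m (PySem.Str.len cur) ls)) := by
  induction ls with
  | nil =>
      intro cur hc
      simp [pvGroups, pvExtendB, hc, pvJoin_singleton]
  | cons l ls ih =>
      intro cur hc
      by_cases h1 : PySem.Str.len cur + 1 + PySem.Str.len l ≤ m
      · have hne := pvAppend3_ne_empty cur l hc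
        have := ih (cur ++ "\n" ++ l) hne
        simp only [pvGroups, if_neg hc, if_pos h1]
        rw [this]
        simp only [pvExtendB, if_pos h1, pvLen_append3]
        rw [List.take_succ_cons, List.drop_succ_cons, pvJoin_cons_cons]
      · simp only [pvGroups, if_neg hc, pvExtendB, if_neg h1]
        simp [pvGroups, pvJoin_singleton]

-- B's group-jumping scan is the hard-split image of the group list
theorem pvGoB_eq_flatMap (m : Int) :
    ∀ (n : Nat) (lines : List String), lines.length ≤ n →
      pvGoB m lines = (pvGroups m "" lines).flatMap (pvHardB m) := by
  intro n
  induction n with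
  | zero =>
      intro lines h
      have : lines = [] := List.eq_nil_of_length_eq_zero (Nat.le_zero.mp h)
      subst this; simp [pvGoB, pvGroups]
  | succ n ih =>
      intro lines h
      match lines with
      | [] => simp [pvGoB, pvGroups]
      | l :: ls =>
          by_cases h0 : l = ""
          · subst h0
            rw [pvGoB]
            simp only [reduceIte]
            rw [ih ls (by simpa using Nat.lt_succ_iff.mp (by simpa using h))]
            simp [pvGroups]
          · rw [pvGoB]
            simp only [if_neg h0]
            have hge := pvGroups_extend m ls l h0
            have : pvGroups m "" (l :: ls) = pvGroups m l ls := by simp [pvGroups]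
            rw [this, hge]
            simp only [List.flatMap_cons]
            congr 1
            exact ih _ (by
              have : ls.length ≤ n := by simpa using Nat.lt_succ_iff.mp (by simpa using h)
              calc (ls.drop (pvExtendB m (PySem.Str.len l) ls)).length ≤ ls.length := by
                    simp [List.length_drop]
                _ ≤ n := this)

-- the degenerate Pre_ case: all lines empty ⇒ both ports return []
theorem pvAllEmpty_A (m : Int) (lines : List String) (h : ∀ l ∈ lines, l = "") :
    lines.foldl (pvStepA m) ([], "") = ([], "") := by
  induction lines with
  | nil => rfl
  | cons l ls ih =>
      have hl : l = "" := h l (by simp)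
      simp only [List.foldl_cons]
      have : pvStepA m (([] : List String), "") l = ([], "") := by simp [pvStepA, hl]
      rw [this]
      exact ih (fun x hx => h x (by simp [hx]))

theorem pvAllEmpty_B (m : Int) (lines : List String) (h : ∀ l ∈ lines, l = "") :
    pvGoB m lines = [] := by
  induction lines with
  | nil => simp [pvGoB]
  | cons l ls ih =>
      have hl : l = "" := h l (by simp)
      rw [pvGoB]
      simp only [if_pos hl]
      exact ih (fun x hx => h x (by simp [hx]))

-- ===== VERDICT (by name: the statement is the Claim_ definition above) =====
theorem split_oversized_block_py_spec : Claim_equal_split_oversized_block_py := by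
  intro block max_size _ hpre
  unfold Spec_split_oversized_block_py
  show split_oversized_block_py block max_size = split_oversized_block_py_alt block max_size
  set lines := (PySem.Str.split? block "\n").getD [] with hl
  have ha : split_oversized_block_py block max_size
      = (let st := lines.foldl (pvStepA max_size) ([], "")
         (if st.2 ≠ "" then st.1 ++ [st.2] else st.1).foldl (pvEmit max_size) []) := rfl
  have hb : split_oversized_block_py_alt block max_size = pvGoB max_size lines := rfl
  rw [ha, hb]
  rcases hpre with hm | hall
  · -- main case: 1 ≤ max_size
    simp only []
    rw [pvFoldl_emit, pvFoldA_groups]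
    rw [pvGoB_eq_flatMap max_size lines.length lines (le_refl _)]
    simp only [List.nil_append]
    exact List.flatMap_congr (fun c _ => pvHardA_eq_hardB max_size hm c)
  · -- all lines empty (covers max_size ≤ 0): both sides are []
    rw [pvAllEmpty_A max_size lines hall]
    simp [pvAllEmpty_B max_size lines hall]
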